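-- pv_equiv track=rewrite | github.com/Etion123/bigdata_deploy | tools/iceberg_hive_partition_migration/migrate_hive_to_iceberg.py | _parse_partitioned_by_inner
-- ===== SOURCE A (Python) =====
-- from typing import Any, List, Sequence
--
-- def _parse_partitioned_by_inner(inner: str) -> List[str]:
--     """Split PARTITIONED BY inner on commas at depth 0; first token of each piece is the column name."""
--     cols: List[str] = []
--     depth = 0
--     buf: List[str] = []
--     for ch in inner:
--         if ch == "(":
--             depth += 1
--         elif ch == ")":
--             depth -= 1
--         if ch == "," and depth == 0:
--             piece = "".join(buf).strip()
--             buf = []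
--             if piece:
--                 piece = piece.strip("`").strip()
--                 ident = piece.split()[0].strip("`") if piece else ""
--                 if ident:
--                     cols.append(ident)
--             continue
--         buf.append(ch)
--     piece = "".join(buf).strip()
--     if piece:
--         piece = piece.strip("`").strip()
--         ident = piece.split()[0].strip("`") if piece else ""
--         if ident:
--             cols.append(ident)
--     return cols
-- ===== SOURCE B (Python) =====
-- def _extract_ident(segment):
--     """First identifier of one depth-0 segment, '' if none."""
--     piece = segment.strip()
--     if not piece:
--         return ""
--     piece = piece.strip("`").strip()
--     if not piece:
--         return ""
--     return piece.split()[0].strip("`")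
--
--
-- def _parse_partitioned_by_inner(inner):
--     """Two passes: split on depth-0 commas into segments, then extract each segment's identifier."""
--     segments = []
--     depth = 0
--     start = 0
--     for i, ch in enumerate(inner):
--         if ch == "(":
--             depth += 1
--         elif ch == ")":
--             depth -= 1
--         elif ch == "," and depth == 0:
--             segments.append(inner[start:i])
--             start = i + 1
--     segments.append(inner[start:])
--     cols = []
--     for seg in segments:
--         ident = _extract_ident(seg)
--         if ident:
--             cols.append(ident)
--     return cols
-- ===== Notes on version B (the rewrite author's own statement) =====
-- stated objective: simpler
-- what changed: B splits the string in a first index-tracking pass into depth-0 comma segments (slices) and then runs one shared per-segment identifier extraction, removing A's single-pass character buffer with its duplicated tail-handling code.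
import Mathlib
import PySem

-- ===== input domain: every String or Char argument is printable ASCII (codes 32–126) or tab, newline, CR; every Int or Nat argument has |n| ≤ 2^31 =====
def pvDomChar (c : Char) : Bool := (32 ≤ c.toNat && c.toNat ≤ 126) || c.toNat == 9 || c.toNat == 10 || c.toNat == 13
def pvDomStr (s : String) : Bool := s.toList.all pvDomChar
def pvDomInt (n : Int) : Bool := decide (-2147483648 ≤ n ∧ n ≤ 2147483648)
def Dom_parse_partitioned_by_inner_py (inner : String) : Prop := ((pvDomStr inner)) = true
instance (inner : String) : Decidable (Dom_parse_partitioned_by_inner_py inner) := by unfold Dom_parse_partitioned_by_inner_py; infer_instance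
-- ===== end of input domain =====

-- B replaces A's one-pass buffer loop with duplicated tail code by a two-pass split
-- (index/slice segmentation, then one shared per-segment extraction); objective: simpler.

-- ===== PORT A =====
-- one loop step of A: update depth, then either flush buf (extracting the ident inline) or append ch
def pvStepA (st : List (List Char) × Int × List Char) (ch : Char) :
    List (List Char) × Int × List Char :=
  let cols := st.1
  let d0 := st.2.1
  let buf := st.2.2
  let depth := if ch = '(' then d0 + 1 else if ch = ')' then d0 - 1 else d0
  if ch = ',' ∧ depth = 0 then
    let piece := PySem.Chars.strip buf
    let cols' :=
      if piece ≠ [] then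
        let piece2 := PySem.Chars.strip (PySem.Chars.stripChars piece ['`'])
        let ident := if piece2 ≠ [] then
            PySem.Chars.stripChars ((PySem.Chars.split₀ piece2).headD []) ['`'] else []
        if ident ≠ [] then cols ++ [ident] else cols
      else cols
    (cols', depth, [])
  else (cols, depth, buf ++ [ch])

def parse_partitioned_by_inner_py (inner : String) : List String :=
  let r := inner.toList.foldl pvStepA ([], 0, [])
  let cols := r.1
  let buf := r.2.2
  -- A's duplicated tail handling
  let piece := PySem.Chars.strip buf
  let cols2 :=
    if piece ≠ [] then
      let piece2 := PySem.Chars.strip (PySem.Chars.stripChars piece ['`'])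
      let ident := if piece2 ≠ [] then
          PySem.Chars.stripChars ((PySem.Chars.split₀ piece2).headD []) ['`'] else []
      if ident ≠ [] then cols ++ [ident] else cols
    else cols
  cols2.map String.ofList

-- ===== PORT B =====
-- _extract_ident(segment): strip, backtick-strip, first whitespace token, backtick-strip
def pvExtractIdent (segment : List Char) : List Char :=
  let piece := PySem.Chars.strip segment
  if piece = [] then []
  else
    let piece2 := PySem.Chars.strip (PySem.Chars.stripChars piece ['`'])
    if piece2 = [] then []
    else PySem.Chars.stripChars ((PySem.Chars.split₀ piece2).headD []) ['`']

-- body of B's second loop: append the extracted ident if non-empty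
def pvAppendIdent (cols : List (List Char)) (seg : List Char) : List (List Char) :=
  let ident := pvExtractIdent seg
  if ident ≠ [] then cols ++ [ident] else cols

-- body of B's first (index) loop over enumerate(inner): record slice [start:i] at depth-0 commas
def pvStepB (full : List Char) (st : List (List Char) × Int × Int) (p : Int × Char) :
    List (List Char) × Int × Int :=
  let segs := st.1
  let depth := st.2.1
  let start := st.2.2
  let i := p.1
  let ch := p.2
  if ch = '(' then (segs, depth + 1, start)
  else if ch = ')' then (segs, depth - 1, start)
  else if ch = ',' ∧ depth = 0 then (segs ++ [PySem.List.slice full (some start) (some i)], depth, i + 1)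
  else (segs, depth, start)

def parse_partitioned_by_inner_py_alt (inner : String) : List String :=
  let cs := inner.toList
  let r := (PySem.List.enumerate cs 0).foldl (pvStepB cs) ([], 0, 0)
  let segments := r.1 ++ [PySem.List.slice cs (some r.2.2) none]
  (segments.foldl pvAppendIdent []).map String.ofList

-- ===== PRECONDITION & SPEC =====
def Spec_parse_partitioned_by_inner_py (inner : String) (out : List String) : Prop := out = parse_partitioned_by_inner_py_alt inner
instance (inner : String) (out : List String) : Decidable (Spec_parse_partitioned_by_inner_py inner out) := by unfold Spec_parse_partitioned_by_inner_py; infer_instance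

-- ===== CLAIM (what is proved, stated in full; the proofs are below) =====
def Claim_equal_parse_partitioned_by_inner_py : Prop := ∀ (inner : String), Dom_parse_partitioned_by_inner_py inner → Spec_parse_partitioned_by_inner_py inner (parse_partitioned_by_inner_py inner)

-- ===== LEMMAS AND PROOFS =====

-- canonical depth-0 segmentation both loops compute
def pvSegs (buf : List Char) (d : Int) : List Char → List (List Char)
  | [] => [buf]
  | c :: cs =>
    if c = '(' then pvSegs (buf ++ [c]) (d + 1) cs
    else if c = ')' then pvSegs (buf ++ [c]) (d - 1) cs
    else if c = ',' ∧ d = 0 then buf :: pvSegs [] d cs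
    else pvSegs (buf ++ [c]) d cs

-- A's inline extraction-and-append equals B's helper
lemma pv_inline_eq (cols : List (List Char)) (buf : List Char) :
    (let piece := PySem.Chars.strip buf
     if piece ≠ [] then
       let piece2 := PySem.Chars.strip (PySem.Chars.stripChars piece ['`'])
       let ident := if piece2 ≠ [] then
           PySem.Chars.stripChars ((PySem.Chars.split₀ piece2).headD []) ['`'] else []
       if ident ≠ [] then cols ++ [ident] else cols
     else cols) = pvAppendIdent cols buf := by
  simp only [pvAppendIdent, pvExtractIdent]
  by_cases h1 : PySem.Chars.strip buf = [] <;>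
    by_cases h2 : PySem.Chars.strip (PySem.Chars.stripChars (PySem.Chars.strip buf) ['`']) = [] <;>
      simp [h1, h2]

-- at a depth-0 comma A's step flushes buf through the shared extraction
lemma pv_stepA_comma (cols : List (List Char)) (d : Int) (buf : List Char) (hd : d = 0) :
    pvStepA (cols, d, buf) ',' = (pvAppendIdent cols buf, d, []) := by
  subst hd
  simp [pvStepA, pvAppendIdent, pvExtractIdent]
  split <;> simp_all

-- A's fold (plus its tail handling) computes the per-segment fold over pvSegs
lemma pv_A_eq_segs (cs : List Char) : ∀ (cols : List (List Char)) (d : Int) (buf : List Char),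
    pvAppendIdent (cs.foldl pvStepA (cols, d, buf)).1 (cs.foldl pvStepA (cols, d, buf)).2.2
      = (pvSegs buf d cs).foldl pvAppendIdent cols := by
  induction cs with
  | nil => intro cols d buf; simp [pvSegs]
  | cons c cs ih =>
    intro cols d buf
    by_cases hp : c = '('
    · simp [pvStepA, pvSegs, hp, ih]
    · by_cases hq : c = ')'
      · simp [pvStepA, pvSegs, hq, ih]
      · by_cases hc : c = ',' ∧ d = 0
        · obtain ⟨hc1, hc2⟩ := hc
          subst hc1
          simp only [List.foldl_cons, pv_stepA_comma cols d buf hc2]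
          rw [ih]
          simp [pvSegs, hc2]
        · have hc' : ¬ (c = ',' ∧ (if c = '(' then d + 1 else if c = ')' then d - 1 else d) = 0) := by
            simpa [hp, hq] using hc
          simp [pvStepA, pvSegs, hp, hq, hc, ih]

-- B's index loop recovers the same segmentation via slices
lemma pv_B_eq_segs (cs' : List Char) :
    ∀ (full : List Char) (k : Nat) (w : List Char) (segs : List (List Char)) (d : Int),
    full.drop k = w ++ cs' →
    (let r := (PySem.List.enumerate cs' ((k + w.length : Nat) : Int)).foldl (pvStepB full) (segs, d, (k : Int));
     r.1 ++ [PySem.List.slice full (some r.2.2) none]) = segs ++ pvSegs w d cs' := by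
  induction cs' with
  | nil =>
    intro full k w segs d h
    simp [PySem.List.enumerate, pvSegs, PySem.List.slice_from_natCast, h]
  | cons c cs ih =>
    intro full k w segs d h
    rw [PySem.List.enumerate_cons]
    by_cases hp : c = '('
    · subst hp
      have h' : full.drop k = (w ++ ['(']) ++ cs := by simpa using h
      have := ih full k (w ++ ['(']) segs (d + 1) h'
      simp only [List.foldl_cons, pvStepB, if_true, pvSegs]
      simpa [Nat.cast_add, add_assoc] using this
    · by_cases hq : c = ')'
      · subst hq
        have h' : full.drop k = (w ++ [')']) ++ cs := by simpa using h
        have := ih full k (w ++ [')']) segs (d - 1) h'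
        simp only [List.foldl_cons, pvStepB, if_true, pvSegs]
        simpa [Nat.cast_add, add_assoc] using this
      · by_cases hc : c = ',' ∧ d = 0
        · obtain ⟨hc1, hc2⟩ := hc
          subst hc1
          subst hc2
          have h'' : full.drop (k + w.length + 1) = cs := by
            have h2 : full.drop k = (w ++ [',']) ++ cs := by simpa using h
            have h3 : (full.drop k).drop (w.length + 1) = cs := by rw [h2]; simp
            rw [List.drop_drop] at h3
            rw [show k + w.length + 1 = k + (w.length + 1) from by omega]
            exact h3
          have hsl : PySem.List.slice full (some ((k : Nat) : Int)) (some ((k + w.length : Nat) : Int)) = w := by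
            rw [PySem.List.slice_natCast, h]
            simp
          have hoff : (((k + w.length : Nat) : Int) + 1) = (((k + w.length + 1 : Nat) : Int)) := by
            push_cast; ring
          simp only [List.foldl_cons, pvStepB, hp, hq, if_false, pvSegs]
          rw [if_pos ⟨trivial, trivial⟩, if_pos ⟨trivial, trivial⟩, hsl, hoff]
          have := ih full (k + w.length + 1) [] (segs ++ [w]) 0 (by simpa using h'')
          simpa using this
        · have h' : full.drop k = (w ++ [c]) ++ cs := by simpa using h
          have := ih full k (w ++ [c]) segs d h'
          simp only [List.foldl_cons, pvStepB, pvSegs]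
          rw [if_neg hp, if_neg hq, if_neg hc, if_neg hp, if_neg hq, if_neg hc]
          simpa [Nat.cast_add, add_assoc] using this

-- ===== VERDICT (by name: the statement is the Claim_ definition above) =====
theorem parse_partitioned_by_inner_py_spec : Claim_equal_parse_partitioned_by_inner_py := by
  intro inner _
  unfold Spec_parse_partitioned_by_inner_py parse_partitioned_by_inner_py parse_partitioned_by_inner_py_alt
  have hB := pv_B_eq_segs inner.toList inner.toList 0 [] [] 0 (by simp)
  simp only [Nat.add_zero, List.length_nil, Nat.cast_zero, List.nil_append] at hB
  have hA := pv_A_eq_segs inner.toList [] 0 []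
  simp only []
  rw [pv_inline_eq, hA, ← hB]
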